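-- pv_equiv track=rewrite | github.com/hnjgg/SquirtlesAlgorithmStudy-Hard | 민서/자동완성.py | solution
-- ===== SOURCE A (Python) =====
-- def solution(words):
--     ans = 0
--     words = [""] + sorted(words) + [""]
--     for i in range(1, len(words) - 1):
--         j1 = j2 = 0
--         lp = len(words[i - 1])
--         l0 = len(words[i])
--         ln = len(words[i + 1])
--         while j1 < lp and j1 < l0 and words[i - 1][j1] == words[i][j1]:
--             j1 += 1
--         while j2 < l0 and j2 < ln and words[i][j2] == words[i + 1][j2]:
--             j2 += 1
--         j = max(j1, j2)
--         if j < len(words[i]):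
--             j += 1
--         ans += j
--
--     return ans
-- ===== SOURCE B (Python) =====
-- def solution(words):
--     # Brute force: for each word, take the longest common prefix with any other
--     # occurrence in the list, then type one more character (capped at the word length).
--     def lcp(a, b):
--         n = 0
--         for x, y in zip(a, b):
--             if x != y:
--                 break
--             n += 1
--         return n
--
--     total = 0
--     for i, w in enumerate(words):
--         best = 0
--         for j, v in enumerate(words):
--             if i != j:
--                 best = max(best, lcp(w, v))
--         total += min(best + 1, len(w))
--     return total
-- ===== Notes on version B (the rewrite author's own statement) =====
-- stated objective: simpler
-- what changed: A sorts the words, pads with empty sentinels and compares each word with its two sorted neighbours via index-juggling while loops; B drops the sort entirely and for each word directly takes the maximum longest-common-prefix over all other words, summing min(best+1, len(word)) - plainer, at the price of an all-pairs quadratic scan.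
import Mathlib
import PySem

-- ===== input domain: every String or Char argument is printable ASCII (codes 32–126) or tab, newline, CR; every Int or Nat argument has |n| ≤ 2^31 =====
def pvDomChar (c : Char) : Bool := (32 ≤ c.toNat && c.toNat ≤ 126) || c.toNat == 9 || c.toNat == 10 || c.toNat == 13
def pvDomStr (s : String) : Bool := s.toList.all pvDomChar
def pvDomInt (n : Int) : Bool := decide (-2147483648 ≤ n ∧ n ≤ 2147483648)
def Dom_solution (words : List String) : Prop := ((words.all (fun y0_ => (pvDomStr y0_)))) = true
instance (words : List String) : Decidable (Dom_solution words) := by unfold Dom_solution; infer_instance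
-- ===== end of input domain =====

-- B drops A's sort-and-compare-adjacent scan: for each word it takes the longest common
-- prefix with any other word directly (plainer, but quadratic); same return value everywhere.

-- ===== PORT A =====
-- A's inner while loop: advance j while both words have a character at j and they agree
-- (the guard keeps j in range, so `getD` reads exactly Python's words[...][j])
def whileLcp (a b : List Char) (j : Nat) : Nat :=
  if h : j < a.length ∧ j < b.length ∧ a.getD j default = b.getD j default then
    whileLcp a b (j + 1)
  else j
termination_by a.length - j
decreasing_by omega

def solution (words : List String) : Int :=
  let ws : List String := [""] ++ PySem.List.sorted words (fun x => x) ++ [""]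
  (PySem.List.pyRange 1 ((ws.length : Int) - 1)).foldl (fun ans i =>
    -- every index i-1, i, i+1 is in range here, so pyGetD reads exactly Python's words[...]
    let prev := (PySem.List.pyGetD ws (i - 1) "").toList
    let cur := (PySem.List.pyGetD ws i "").toList
    let next := (PySem.List.pyGetD ws (i + 1) "").toList
    let j1 := whileLcp prev cur 0
    let j2 := whileLcp cur next 0
    let j := max j1 j2
    let j := if j < cur.length then j + 1 else j
    ans + (j : Int)) 0

-- ===== PORT B =====
-- Source B's lcp: for x, y in zip(a, b): if x != y: break; n += 1
def lcpZip : List (Char × Char) → Nat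
  | [] => 0
  | (x, y) :: r => if x ≠ y then 0 else lcpZip r + 1

def solution_alt (words : List String) : Int :=
  (PySem.List.enumerate words).foldl (fun total iw =>
    let others := PySem.List.slice words none (some iw.1) ++ PySem.List.slice words (some (iw.1 + 1)) none
    let best := others.foldl (fun best v => max best (lcpZip (iw.2.toList.zip v.toList))) 0
    total + ((min (best + 1) iw.2.toList.length : Nat) : Int)) 0

-- ===== PRECONDITION & SPEC =====
def Spec_solution (words : List String) (out : Int) : Prop := out = solution_alt words
instance (words : List String) (out : Int) : Decidable (Spec_solution words out) := by unfold Spec_solution; infer_instance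

-- ===== CLAIM (what is proved, stated in full; the proofs are below) =====
def Claim_equal_solution : Prop := ∀ (words : List String), Dom_solution words → Spec_solution words (solution words)

-- ===== LEMMAS AND PROOFS =====

-- canonical longest common prefix of two character lists
def lcp : List Char → List Char → Nat
  | x :: a, y :: b => if x = y then lcp a b + 1 else 0
  | _, _ => 0

def lcpS (s t : String) : Nat := lcp s.toList t.toList

def maxLcp (w : String) (l : List String) : Nat :=
  l.foldl (fun m v => max m (lcpS w v)) 0

-- the per-word typed-character count, phrased on the multiset of the other words
def val (l : List String) (w : String) : Int :=
  ((min (maxLcp w (l.erase w) + 1) w.toList.length : Nat) : Int)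

-- the common midpoint: per-index sum over l of min(max-lcp-with-others + 1, length)
def idxSum (l : List String) : Int :=
  ((List.range l.length).map (fun k =>
    ((min (maxLcp (l.getD k "") (l.eraseIdx k) + 1) (l.getD k "").toList.length : Nat) : Int))).sum

-- ---- lcp basics ----
lemma lcp_nil_right (a : List Char) : lcp a [] = 0 := by cases a <;> rfl

lemma lcp_le_length_left (a b : List Char) : lcp a b ≤ a.length := by
  induction a generalizing b with
  | nil => simp [lcp]
  | cons x a ih =>
    cases b with
    | nil => simp [lcp_nil_right]
    | cons y b => by_cases h : x = y <;> simp [lcp, h] <;> exact ih b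

lemma lcp_comm (a b : List Char) : lcp a b = lcp b a := by
  induction a generalizing b with
  | nil => cases b <;> simp [lcp]
  | cons x a ih =>
    cases b with
    | nil => simp [lcp]
    | cons y b =>
      by_cases h : x = y
      · subst h; simp [lcp, ih]
      · have h' : ¬ y = x := fun hh => h hh.symm
        simp [lcp, h, h']

lemma cons_le_cons_iff (x y : Char) (a b : List Char) :
    (x :: a) ≤ (y :: b) ↔ x < y ∨ (x = y ∧ a ≤ b) := by
  rw [le_iff_lt_or_eq, le_iff_lt_or_eq, List.cons_lt_cons_iff, List.cons.injEq]
  tauto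

-- lexicographic squeeze: a ≤ b ≤ c pin b's prefix to the common prefix of a and c
lemma lcp_squeeze (a b c : List Char) (hab : a ≤ b) (hbc : b ≤ c) :
    lcp a c ≤ lcp b c ∧ lcp a c ≤ lcp a b := by
  induction a generalizing b c with
  | nil => simp [lcp]
  | cons x a ih =>
    cases c with
    | nil => simp [lcp_nil_right]
    | cons z c =>
      by_cases hxz : x = z
      · subst hxz
        cases b with
        | nil => exact absurd hab (of_decide_eq_false rfl)
        | cons y b =>
          rcases (cons_le_cons_iff x y a b).mp hab with h1 | ⟨h1, hab'⟩
          · rcases (cons_le_cons_iff y x b c).mp hbc with h2 | ⟨h2, _⟩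
            · exact absurd (lt_trans h1 h2) (lt_irrefl x)
            · exact absurd (h2 ▸ h1) (lt_irrefl x)
          · subst h1
            rcases (cons_le_cons_iff x x b c).mp hbc with h2 | ⟨_, hbc'⟩
            · exact absurd h2 (lt_irrefl x)
            · have := ih b c hab' hbc'
              simp [lcp]; omega
      · simp [lcp, hxz]

-- ---- maxLcp facts ----
lemma maxLcp_eq_foldl_map (w : String) (l : List String) :
    maxLcp w l = (l.map (lcpS w)).foldl max 0 := by rw [List.foldl_map]; rfl

lemma foldl_max_le {l : List Nat} {m K : Nat} (hm : m ≤ K)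
    (h : ∀ v ∈ l, v ≤ K) : l.foldl max m ≤ K := by
  induction l generalizing m with
  | nil => simpa using hm
  | cons v l ih =>
    simp only [List.foldl_cons]
    exact ih (max_le hm (h v (List.mem_cons_self))) (fun u hu => h u (List.mem_cons_of_mem _ hu))

lemma maxLcp_le {l : List String} {w : String} {K : Nat}
    (h : ∀ v ∈ l, lcpS w v ≤ K) : maxLcp w l ≤ K := by
  rw [maxLcp_eq_foldl_map]
  exact foldl_max_le (Nat.zero_le K) (by simpa using h)

lemma le_maxLcp {l : List String} {w v : String} (hv : v ∈ l) : lcpS w v ≤ maxLcp w l := by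
  rw [maxLcp_eq_foldl_map]
  exact (PySem.List.le_foldl_max _ _).2 _ (List.mem_map_of_mem hv)

lemma maxLcp_perm {l₁ l₂ : List String} (w : String) (h : l₁.Perm l₂) :
    maxLcp w l₁ = maxLcp w l₂ :=
  le_antisymm (maxLcp_le (fun v hv => le_maxLcp (h.mem_iff.mp hv)))
    (maxLcp_le (fun v hv => le_maxLcp (h.mem_iff.mpr hv)))

-- ---- port-A helpers unfolded ----
lemma whileLcp_eq (a b : List Char) (j : Nat) :
    whileLcp a b j = j + lcp (a.drop j) (b.drop j) := by
  fun_induction whileLcp a b j with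
  | case1 j h ih =>
    obtain ⟨ha, hb, he⟩ := h
    rw [ih, List.drop_eq_getElem_cons ha, List.drop_eq_getElem_cons hb]
    rw [List.getD_eq_getElem a default ha, List.getD_eq_getElem b default hb] at he
    simp [lcp, he]; omega
  | case2 j h =>
    push Not at h
    rcases Nat.lt_or_ge j a.length with ha | ha
    · rcases Nat.lt_or_ge j b.length with hb | hb
      · have hne := h ha hb
        rw [List.getD_eq_getElem a default ha, List.getD_eq_getElem b default hb] at hne
        rw [List.drop_eq_getElem_cons ha, List.drop_eq_getElem_cons hb]
        simp [lcp, hne]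
      · rw [List.drop_eq_nil_of_le hb, lcp_nil_right]; omega
    · rw [List.drop_eq_nil_of_le ha]; simp [lcp]

lemma lcpZip_eq (a b : List Char) : lcpZip (a.zip b) = lcp a b := by
  induction a generalizing b with
  | nil => simp [lcpZip, lcp]
  | cons x a ih =>
    cases b with
    | nil => simp [lcpZip, lcp_nil_right]
    | cons y b => by_cases h : x = y <;> simp [lcpZip, lcp, h, ih]

-- ---- sorted position: the neighbours dominate all other lcps ----
lemma mem_le_getLast {p : List String} (hp : p.Pairwise (· ≤ ·)) {v : String} (hv : v ∈ p) :
    v ≤ p.getLastD "" := by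
  induction p with
  | nil => cases hv
  | cons u p ih =>
    cases p with
    | nil => simp at hv; simp [hv]
    | cons w p' =>
      rcases List.mem_cons.mp hv with rfl | hv
      · have hmem : (w :: p').getLastD "" ∈ w :: p' := by
          rw [List.getLastD_cons]; exact List.getLastD_mem_cons
        exact le_trans (le_refl v) ((List.pairwise_cons.mp hp).1 _ hmem)
      · exact ih (List.pairwise_cons.mp hp).2 hv

lemma headD_le_mem {q : List String} (hq : q.Pairwise (· ≤ ·)) {v : String} (hv : v ∈ q) :
    q.headD "" ≤ v := by
  cases q with
  | nil => cases hv
  | cons u q' =>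
    rcases List.mem_cons.mp hv with rfl | hv
    · exact le_refl v
    · exact (List.pairwise_cons.mp hq).1 _ hv

lemma lcpS_squeeze_left {a b c : String} (hab : a ≤ b) (hbc : b ≤ c) : lcpS a c ≤ lcpS b c := by
  exact (lcp_squeeze a.toList b.toList c.toList (String.le_iff_toList_le.mp hab)
    (String.le_iff_toList_le.mp hbc)).1

lemma lcpS_squeeze_right {a b c : String} (hab : a ≤ b) (hbc : b ≤ c) : lcpS a c ≤ lcpS a b := by
  exact (lcp_squeeze a.toList b.toList c.toList (String.le_iff_toList_le.mp hab)
    (String.le_iff_toList_le.mp hbc)).2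

lemma lcpS_comm (s t : String) : lcpS s t = lcpS t s := lcp_comm _ _

lemma lcpS_empty_left (w : String) : lcpS "" w = 0 := by simp [lcpS, lcp]

lemma lcpS_empty_right (w : String) : lcpS w "" = 0 := by simp [lcpS, lcp_nil_right]

lemma getLastD_mem {p : List String} (hp : p ≠ []) : p.getLastD "" ∈ p := by
  cases p with
  | nil => exact absurd rfl hp
  | cons u p' => rw [List.getLastD_cons]; exact List.getLastD_mem_cons

lemma headD_mem {q : List String} (hq : q ≠ []) : q.headD "" ∈ q := by
  cases q with
  | nil => exact absurd rfl hq
  | cons u q' => exact List.mem_cons_self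

lemma maxLcp_sorted (p q : List String) (w : String)
    (h : (p ++ w :: q).Pairwise (· ≤ ·)) :
    maxLcp w (p ++ q) = max (lcpS (p.getLastD "") w) (lcpS w (q.headD "")) := by
  rw [List.pairwise_append] at h
  obtain ⟨hp, hwq', hcross⟩ := h
  have hq := (List.pairwise_cons.mp hwq').2
  have hwq : ∀ y ∈ q, w ≤ y := (List.pairwise_cons.mp hwq').1
  have hpw : ∀ x ∈ p, x ≤ w := fun x hx => hcross x hx w List.mem_cons_self
  apply le_antisymm
  · apply maxLcp_le
    intro v hv
    rcases List.mem_append.mp hv with hv | hv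
    · have hne : p ≠ [] := List.ne_nil_of_mem hv
      have h1 : v ≤ p.getLastD "" := mem_le_getLast hp hv
      have h2 : p.getLastD "" ≤ w := hpw _ (getLastD_mem hne)
      calc lcpS w v = lcpS v w := lcpS_comm _ _
        _ ≤ lcpS (p.getLastD "") w := lcpS_squeeze_left h1 h2
        _ ≤ _ := le_max_left _ _
    · have hne : q ≠ [] := List.ne_nil_of_mem hv
      have h1 : w ≤ q.headD "" := hwq _ (headD_mem hne)
      have h2 : q.headD "" ≤ v := headD_le_mem hq hv
      calc lcpS w v ≤ lcpS w (q.headD "") := lcpS_squeeze_right h1 h2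
        _ ≤ _ := le_max_right _ _
  · apply max_le
    · rcases eq_or_ne p [] with rfl | hne
      · simp [lcpS_empty_left]
      · rw [lcpS_comm]
        exact le_maxLcp (List.mem_append.mpr (.inl (getLastD_mem hne)))
    · rcases eq_or_ne q [] with rfl | hne
      · simp [lcpS_empty_right]
      · exact le_maxLcp (List.mem_append.mpr (.inr (headD_mem hne)))

-- ---- solution_alt = idxSum ----
lemma map_range_getD {α β : Type} (l : List α) (d : α) (f : α → β) :
    (List.range l.length).map (fun k => f (l.getD k d)) = l.map f := by
  induction l with
  | nil => simp
  | cons x l ih =>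
    rw [List.length_cons, List.range_succ_eq_map, List.map_cons, List.map_map]
    congr 1

lemma eraseIdx_perm_erase (l : List String) (k : Nat) (h : k < l.length) :
    (l.eraseIdx k).Perm (l.erase (l.getD k "")) := by
  have h1 : (l[k] :: l.eraseIdx k).Perm l := List.getElem_cons_eraseIdx_perm h
  have h2 : l.Perm (l[k] :: l.erase l[k]) := List.perm_cons_erase (l.getElem_mem h)
  have := (h1.trans h2).cons_inv
  rwa [List.getD_eq_getElem l "" h]

lemma solution_alt_eq (words : List String) : solution_alt words = idxSum words := by
  have h0 : solution_alt words = (PySem.List.enumerate words).foldl (fun total iw =>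
      total + ((min ((PySem.List.slice words none (some iw.1) ++
        PySem.List.slice words (some (iw.1 + 1)) none).foldl
          (fun best v => max best (lcpZip (iw.2.toList.zip v.toList))) 0 + 1)
        iw.2.toList.length : Nat) : Int)) 0 := rfl
  rw [h0, PySem.List.foldl_add, PySem.List.enumerate_eq_map_pyRange words ""]
  rw [show PySem.List.len words = (words.length : Int) from rfl,
    PySem.List.pyRange_zero_natCast]
  simp only [List.map_map, zero_add]
  unfold idxSum
  congr 1
  apply List.map_congr_left
  intro k hk
  rw [List.mem_range] at hk
  simp only [Function.comp_apply, PySem.List.pyGetD_natCast]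
  have hsl1 : PySem.List.slice words none (some (k : Int)) = words.take k := by
    rw [PySem.List.slice_to words (by omega)]; simp
  have hsl2 : PySem.List.slice words (some ((k : Int) + 1)) none = words.drop (k + 1) := by
    rw [show ((k : Int) + 1) = ((k + 1 : Nat) : Int) by push_cast; ring,
      PySem.List.slice_from words (by omega)]
    simp
  rw [hsl1, hsl2, ← List.eraseIdx_eq_take_drop_succ]
  congr 2
  rw [show (fun best v => max best (lcpZip ((words.getD k "").toList.zip v.toList)))
      = (fun best v => max best (lcpS (words.getD k "") v)) from
    funext (fun best => funext (fun v => by rw [lcpZip_eq]; rfl))]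
  rfl

-- ---- solution = idxSum of the sorted list ----
lemma pyRange_one_shift (n : Nat) :
    PySem.List.pyRange 1 ((n : Int) + 1) = (List.range n).map (fun k : Nat => ((k : Int) + 1)) := by
  induction n with
  | zero =>
    simp only [Nat.cast_zero, zero_add, List.range_zero, List.map_nil]
    refine List.eq_nil_iff_forall_not_mem.mpr (fun x hx => ?_)
    have := PySem.List.mem_pyRange_one.mp hx
    omega
  | succ n ih =>
    rw [show ((n + 1 : Nat) : Int) + 1 = ((n : Int) + 1) + 1 by push_cast; ring,
      PySem.List.pyRange_one_succ_right (by omega), ih, List.range_succ, List.map_append]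
    simp

lemma getD_cons_length (p : List String) (d e : String) :
    (d :: p).getD p.length e = p.getLastD d := by
  induction p generalizing d with
  | nil => rfl
  | cons u p' ih => rw [List.length_cons, List.getD_cons_succ, ih, List.getLastD_cons]

lemma getD_append_zero (q : List String) (d : String) : (q ++ [d]).getD 0 d = q.headD d := by
  cases q <;> simp

lemma window_val (s : List String) (hs : s.Pairwise (· ≤ ·)) (k : Nat) (hk : k < s.length) :
    max (lcpS (("" :: s).getD k "") (s.getD k "")) (lcpS (s.getD k "") ((s ++ [""]).getD (k+1) ""))
      = maxLcp (s.getD k "") (s.eraseIdx k) := by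
  have hsplit : s = s.take k ++ s[k] :: s.drop (k+1) := by
    conv_lhs => rw [← List.take_append_drop k s]
    rw [← List.drop_eq_getElem_cons hk]
  have hlenp : (s.take k).length = k := by simp; omega
  have hgd : s.getD k "" = s[k] := List.getD_eq_getElem s "" hk
  have h1 : ("" :: s).getD k "" = (s.take k).getLastD "" := by
    conv_lhs => rw [hsplit]
    rw [show ("" :: (s.take k ++ s[k] :: s.drop (k+1)))
        = ("" :: s.take k) ++ (s[k] :: s.drop (k+1)) from rfl,
      List.getD_append _ _ _ _ (by simp [hlenp])]
    have hgl := getD_cons_length (s.take k) "" ""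
    rw [hlenp] at hgl
    exact hgl
  have h2 : (s ++ [""]).getD (k+1) "" = (s.drop (k+1)).headD "" := by
    conv_lhs => rw [hsplit]
    rw [List.append_assoc, List.getD_append_right _ _ _ _ (by simp [hlenp])]
    rw [hlenp, show k + 1 - k = 1 from by omega]
    rw [show (s[k] :: s.drop (k+1)) ++ [""] = s[k] :: (s.drop (k+1) ++ [""]) from rfl,
      List.getD_cons_succ, getD_append_zero]
  have h3 : s.eraseIdx k = s.take k ++ s.drop (k+1) := List.eraseIdx_eq_take_drop_succ s k
  rw [h1, h2, h3, hgd]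
  refine (maxLcp_sorted (s.take k) (s.drop (k+1)) s[k] ?_).symm
  rw [← hsplit]
  exact hs

lemma A_fold_eq (s : List String) (hs : s.Pairwise (· ≤ ·)) :
    (PySem.List.pyRange 1 ((("" :: (s ++ [""])).length : Int) - 1)).foldl (fun ans i =>
      let prev := (PySem.List.pyGetD ("" :: (s ++ [""])) (i - 1) "").toList
      let cur := (PySem.List.pyGetD ("" :: (s ++ [""])) i "").toList
      let next := (PySem.List.pyGetD ("" :: (s ++ [""])) (i + 1) "").toList
      let j1 := whileLcp prev cur 0
      let j2 := whileLcp cur next 0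
      let j := max j1 j2
      let j := if j < cur.length then j + 1 else j
      ans + (j : Int)) 0 = idxSum s := by
  rw [show ((("" :: (s ++ [""])).length : Int)) - 1 = (s.length : Int) + 1 by
    simp]
  rw [pyRange_one_shift]
  simp only []
  rw [PySem.List.foldl_add, zero_add, List.map_map]
  unfold idxSum
  apply congrArg List.sum
  apply List.map_congr_left
  intro k hk
  rw [List.mem_range] at hk
  simp only [Function.comp_apply]
  rw [show ((k : Int) + 1 - 1) = ((k : Nat) : Int) by ring]
  rw [show ((k : Int) + 1 + 1) = (((k + 2 : Nat)) : Int) by push_cast; ring]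
  rw [show ((k : Int) + 1) = (((k + 1 : Nat)) : Int) by push_cast; ring]
  simp only [PySem.List.pyGetD_natCast]
  have e1 : ("" :: (s ++ [""])).getD k "" = ("" :: s).getD k "" := by
    rw [show ("" :: (s ++ [""])) = ("" :: s) ++ [""] from rfl,
      List.getD_append _ _ _ _ (by simp; omega)]
  have e2 : ("" :: (s ++ [""])).getD (k + 1) "" = s.getD k "" := by
    rw [List.getD_cons_succ, List.getD_append _ _ _ _ hk]
  have e3 : ("" :: (s ++ [""])).getD (k + 2) "" = (s ++ [""]).getD (k + 1) "" := by
    rw [show k + 2 = (k + 1) + 1 from rfl, List.getD_cons_succ]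
  rw [e1, e2, e3]
  simp only [whileLcp_eq, List.drop_zero, Nat.zero_add]
  rw [← window_val s hs k hk]
  simp only [lcpS]
  have hle : max (lcp (("" :: s).getD k "").toList (s.getD k "").toList)
      (lcp (s.getD k "").toList ((s ++ [""]).getD (k + 1) "").toList) ≤ (s.getD k "").toList.length := by
    apply max_le
    · rw [lcp_comm]; exact lcp_le_length_left _ _
    · exact lcp_le_length_left _ _
  congr 1
  split_ifs with h <;> omega

lemma solution_eq (words : List String) :
    solution words = idxSum (PySem.List.sorted words (fun x => x)) :=
  A_fold_eq (PySem.List.sorted words (fun x => x))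
    (PySem.List.sorted_pairwise words (fun x => x))

-- ---- idxSum is a permutation invariant ----
lemma idxSum_eq_val_sum (l : List String) : idxSum l = (l.map (val l)).sum := by
  unfold idxSum
  rw [← map_range_getD l "" (val l)]
  refine congrArg List.sum (List.map_congr_left (fun k hk => ?_))
  rw [List.mem_range] at hk
  unfold val
  rw [maxLcp_perm _ (eraseIdx_perm_erase l k hk)]

lemma idxSum_perm {l₁ l₂ : List String} (h : l₁.Perm l₂) : idxSum l₁ = idxSum l₂ := by
  rw [idxSum_eq_val_sum, idxSum_eq_val_sum]
  have hval : val l₁ = val l₂ :=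
    funext (fun w => by unfold val; rw [maxLcp_perm _ (List.Perm.erase w h)])
  rw [hval]
  exact (h.map (val l₂)).sum_eq

-- ===== VERDICT (by name: the statement is the Claim_ definition above) =====
theorem solution_spec : Claim_equal_solution := by
  intro words _
  unfold Spec_solution
  rw [solution_eq, solution_alt_eq, idxSum_perm (PySem.List.sorted_perm words (fun x => x) false)]
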